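-- pv_equiv track=rewrite | github.com/simonvandevannet/Informatica5 | Toets/Dronken_woorden.py | dronken_worden
-- ===== SOURCE A (Python) =====
-- def dronken_worden(woord):
--     nieuw_woord = woord[0]
--     for i in range(1, len(woord)):
--
--         # even letter?
--         if i % 2 == 0:
--             nieuw_woord += woord[i].upper()
--
--         # oneven letter en vorige letter is hoofdletterklinker op einde nieuwe woord
--         elif nieuw_woord[-1] in 'AEIOU':
--             nieuw_woord += woord[i].upper()
--
--         # oneven letter
--         else:
--             nieuw_woord += woord[i].lower()
--
--     return nieuw_woord
-- ===== SOURCE B (Python) =====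
-- def dronken_worden(woord):
--     # stage 1: keep the first letter as-is, uppercase everything after it
--     up = woord[0] + woord[1:].upper()
--     # stage 2: re-lower each odd position whose predecessor in `up` is not an uppercase vowel
--     out = list(up)
--     for i in range(1, len(out), 2):
--         if up[i - 1] not in 'AEIOU':
--             out[i] = out[i].lower()
--     return ''.join(out)
-- ===== Notes on version B (the rewrite author's own statement) =====
-- stated objective: alternative
-- what changed: Two staged passes instead of A's single self-referential accumulation: first build an intermediate string (first letter kept, rest bulk-uppercased), then re-lower exactly the odd positions whose predecessor in that intermediate string is not an uppercase vowel; the i==1 corner needs no special case because the intermediate keeps woord[0] raw.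
import Mathlib
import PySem

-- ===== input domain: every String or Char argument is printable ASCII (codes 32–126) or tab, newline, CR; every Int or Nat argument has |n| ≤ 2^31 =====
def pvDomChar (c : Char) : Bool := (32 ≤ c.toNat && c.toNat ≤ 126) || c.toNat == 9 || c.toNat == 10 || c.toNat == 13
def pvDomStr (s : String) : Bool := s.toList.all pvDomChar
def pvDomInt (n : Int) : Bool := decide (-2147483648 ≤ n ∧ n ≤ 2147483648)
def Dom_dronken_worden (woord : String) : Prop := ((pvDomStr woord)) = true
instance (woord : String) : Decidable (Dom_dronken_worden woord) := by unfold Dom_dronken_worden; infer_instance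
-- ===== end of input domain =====

-- B replaces A's single self-referential accumulation by two staged passes: uppercase the
-- tail first, then re-lower the odd positions whose predecessor in that staged string is
-- not an uppercase vowel (objective: alternative decomposition).

-- ===== PORT A =====
def pvVowels : List Char := ['A', 'E', 'I', 'O', 'U']

-- the loop 'for i in range(1, len(woord))' of A; acc is nieuw_woord
def dronkenA_loop (cs : List Char) (i : Nat) (acc : List Char) : List Char :=
  if h : i < cs.length then
    let acc' :=
      if i % 2 = 0 then acc ++ [PySem.Chars.upperChar cs[i]]
      else
        -- nieuw_woord[-1] in 'AEIOU' (single-char membership); acc is never empty here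
        match PySem.List.pyGet? acc (-1) with
        | some p =>
          if p ∈ pvVowels then acc ++ [PySem.Chars.upperChar cs[i]]
          else acc ++ [PySem.Chars.lowerChar cs[i]]
        | none => acc
    dronkenA_loop cs (i + 1) acc'
  else acc
termination_by cs.length - i

def dronken_worden (woord : String) : String :=
  match woord.toList with
  | [] => ""  -- Python raises IndexError on woord[0]; excluded by Pre_
  | c :: _ => String.ofList (dronkenA_loop woord.toList 1 [c])

-- ===== PORT B =====
-- up = woord[0] + woord[1:].upper(); then for i in range(1, len(out), 2):
--   if up[i-1] not in 'AEIOU': out[i] = out[i].lower()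
def dronken_worden_alt (woord : String) : String :=
  match woord.toList with
  | [] => ""  -- Python raises IndexError on woord[0]; excluded by Pre_
  | c :: t =>
    let up := c :: PySem.Chars.upper t
    let out := (PySem.List.pyRange 1 (PySem.List.len up) 2).foldl
      (fun acc i =>
        if PySem.List.pyGetD up (i - 1) ' ' ∈ pvVowels then acc
        else PySem.List.pySetD acc i (PySem.Chars.lowerChar (PySem.List.pyGetD acc i ' ')))
      up
    String.ofList out

-- ===== PRECONDITION & SPEC =====
-- Pre_ excludes only the empty string, on which A raises IndexError (woord[0]).
def Pre_dronken_worden (woord : String) : Prop := woord.toList ≠ []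
instance (woord : String) : Decidable (Pre_dronken_worden woord) := by
  unfold Pre_dronken_worden; infer_instance

def pvWitness_dronken_worden : String := "drOnken"

def Spec_dronken_worden (woord : String) (out : String) : Prop := out = dronken_worden_alt woord
instance (woord : String) (out : String) : Decidable (Spec_dronken_worden woord out) := by
  unfold Spec_dronken_worden; infer_instance

-- ===== CLAIM (what is proved, stated in full; the proofs are below) =====
def Claim_equal_dronken_worden : Prop := ∀ (woord : String), Dom_dronken_worden woord → Pre_dronken_worden woord → Spec_dronken_worden woord (dronken_worden woord)

-- ===== LEMMAS AND PROOFS =====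

-- the per-position value both programs produce (proof artefact; neither port computes this)
def pvLetter (cs : List Char) (i : Nat) : Char :=
  if i = 0 then cs.getD 0 ' '
  else if i % 2 = 0 then PySem.Chars.upperChar (cs.getD i ' ')
  else
    let prev := if i = 1 then cs.getD 0 ' ' else PySem.Chars.upperChar (cs.getD (i - 1) ' ')
    if prev ∈ pvVowels then PySem.Chars.upperChar (cs.getD i ' ')
    else PySem.Chars.lowerChar (cs.getD i ' ')

lemma pvLetter_zero (cs : List Char) : pvLetter cs 0 = cs.getD 0 ' ' := by
  simp [pvLetter]

lemma pvLetter_even (cs : List Char) (j : Nat) (hj : j ≠ 0) (he : j % 2 = 0) :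
    pvLetter cs j = PySem.Chars.upperChar (cs.getD j ' ') := by
  simp [pvLetter, hj, he]

lemma pvLetter_odd (cs : List Char) (j : Nat) (hje : j % 2 = 0) :
    pvLetter cs (j + 1) =
      if pvLetter cs j ∈ pvVowels then PySem.Chars.upperChar (cs.getD (j + 1) ' ')
      else PySem.Chars.lowerChar (cs.getD (j + 1) ' ') := by
  have he : ¬ (j + 1) % 2 = 0 := by omega
  by_cases hj0 : j = 0
  · subst hj0; simp [pvLetter]
  · simp [pvLetter, hj0, hje, he]

-- ===== A-side: A's loop produces the pvLetter word =====
lemma dronkenA_loop_eq (cs : List Char) :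
    ∀ (n i : Nat), cs.length - i = n → 1 ≤ i → i ≤ cs.length →
      dronkenA_loop cs i ((List.range i).map (pvLetter cs)) =
        (List.range cs.length).map (pvLetter cs) := by
  intro n
  induction n with
  | zero =>
    intro i hn h1 h2
    have hi : i = cs.length := by omega
    subst hi
    rw [dronkenA_loop]
    simp
  | succ m ih =>
    intro i hn h1 h2
    have hlt : i < cs.length := by omega
    rw [dronkenA_loop]
    simp only [hlt, dif_pos]
    have hrange : List.range (i + 1) = List.range i ++ [i] := List.range_succ
    have hget : cs.getD i ' ' = cs[i] := List.getD_eq_getElem cs ' ' hlt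
    have hstep :
        (if i % 2 = 0 then
            (List.range i).map (pvLetter cs) ++ [PySem.Chars.upperChar cs[i]]
          else
            match PySem.List.pyGet? ((List.range i).map (pvLetter cs)) (-1) with
            | some p =>
              if p ∈ pvVowels then (List.range i).map (pvLetter cs) ++ [PySem.Chars.upperChar cs[i]]
              else (List.range i).map (pvLetter cs) ++ [PySem.Chars.lowerChar cs[i]]
            | none => (List.range i).map (pvLetter cs)) =
          ((List.range (i + 1)).map (pvLetter cs)) := by
      rw [hrange, List.map_append]
      simp only [List.map_cons, List.map_nil]
      by_cases he : i % 2 = 0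
      · have hi0 : i ≠ 0 := by omega
        rw [if_pos he, pvLetter_even cs i hi0 he, hget]
      · obtain ⟨j, rfl⟩ : ∃ j, i = j + 1 := ⟨i - 1, by omega⟩
        have hpref : List.range (j + 1) = List.range j ++ [j] := List.range_succ
        have hlast :
            PySem.List.pyGet? ((List.range (j + 1)).map (pvLetter cs)) (-1) =
              some (pvLetter cs j) := by
          rw [hpref, List.map_append]
          simp only [List.map_cons, List.map_nil]
          exact PySem.List.pyGet?_neg_one_append_singleton _ _
        have hje : j % 2 = 0 := by omega
        rw [if_neg he, hlast, pvLetter_odd cs j hje, hget]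
        by_cases hv : pvLetter cs j ∈ pvVowels <;> simp [hv]
    rw [hstep]
    exact ih (i + 1) (by omega) (by omega) (by omega)

-- ===== B-side helpers =====
lemma islower_iff (c : Char) : PySem.Chars.islower c = true ↔ 97 ≤ c.toNat ∧ c.toNat ≤ 122 := by
  simp only [PySem.Chars.islower, Bool.and_eq_true, decide_eq_true_eq, Char.le_def,
    UInt32.le_iff_toNat_le, Char.toNat_val]
  exact Iff.rfl

lemma isupper_iff (c : Char) : PySem.Chars.isupper c = true ↔ 65 ≤ c.toNat ∧ c.toNat ≤ 90 := by
  simp only [PySem.Chars.isupper, Bool.and_eq_true, decide_eq_true_eq, Char.le_def,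
    UInt32.le_iff_toNat_le, Char.toNat_val]
  exact Iff.rfl

-- Python: x.upper().lower() == x.lower()
lemma lower_upper (c : Char) :
    PySem.Chars.lowerChar (PySem.Chars.upperChar c) = PySem.Chars.lowerChar c := by
  simp only [PySem.Chars.lowerChar, PySem.Chars.upperChar]
  by_cases hl : PySem.Chars.islower c = true
  · rw [if_pos hl]
    have hn := (islower_iff c).1 hl
    have hv : (Char.ofNat (c.toNat - 32)).toNat = c.toNat - 32 := by
      rw [Char.toNat_ofNat, if_pos]; exact Or.inl (by omega)
    have hup : PySem.Chars.isupper (Char.ofNat (c.toNat - 32)) = true := by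
      rw [isupper_iff]; omega
    have hnotup : ¬ PySem.Chars.isupper c = true := by
      rw [isupper_iff]; omega
    rw [if_pos hup, if_neg hnotup, hv]
    have h32 : c.toNat - 32 + 32 = c.toNat := by omega
    rw [h32, Char.ofNat_toNat]
  · rw [if_neg hl]

-- a list is the map of its getD over its index range
lemma self_eq_map_range (xs : List Char) :
    (List.range xs.length).map (fun j => xs.getD j ' ') = xs := by
  apply List.ext_getElem
  · simp
  · intro j h1 h2
    simp [List.getElem?_eq_getElem h2]

-- B's staged string: position 0 keeps the head, every later position is uppercased
lemma up_getD (c : Char) (t : List Char) (j : Nat) :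
    (c :: PySem.Chars.upper t).getD j ' ' =
      if j = 0 then c else PySem.Chars.upperChar ((c :: t).getD j ' ') := by
  cases j with
  | zero => simp
  | succ k =>
    simp only [PySem.Chars.upper, List.getD_cons_succ, if_neg (Nat.succ_ne_zero k)]
    by_cases hk : k < t.length
    · rw [List.getD_eq_getElem _ ' ' (by simpa using hk), List.getD_eq_getElem t ' ' hk,
        List.getElem_map]
    · rw [List.getD_eq_default _ ' ' (by simpa using hk), List.getD_eq_default t ' ' (by omega)]
      simp [PySem.Chars.upperChar, PySem.Chars.islower]

lemma up_length (c : Char) (t : List Char) :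
    (c :: PySem.Chars.upper t).length = (c :: t).length := by
  simp [PySem.Chars.upper]

-- pvLetter computed from the staged string (what B's second pass realises per position)
lemma pvLetter_from_up (c : Char) (t : List Char) (j : Nat) :
    pvLetter (c :: t) j =
      (if j % 2 = 1 ∧ ¬ ((c :: PySem.Chars.upper t).getD (j - 1) ' ' ∈ pvVowels)
        then PySem.Chars.lowerChar ((c :: PySem.Chars.upper t).getD j ' ')
        else (c :: PySem.Chars.upper t).getD j ' ') := by
  by_cases hj0 : j = 0
  · subst hj0
    simp [pvLetter_zero]
  · by_cases he : j % 2 = 0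
    · rw [pvLetter_even _ j hj0 he, if_neg (fun h => by omega), up_getD, if_neg hj0]
    · obtain ⟨k, rfl⟩ : ∃ k, j = k + 1 := ⟨j - 1, by omega⟩
      have hke : k % 2 = 0 := by omega
      rw [pvLetter_odd _ k hke]
      have hprev : (c :: PySem.Chars.upper t).getD (k + 1 - 1) ' ' = pvLetter (c :: t) k := by
        rw [Nat.add_sub_cancel, up_getD]
        by_cases hk0 : k = 0
        · subst hk0; simp [pvLetter_zero]
        · rw [if_neg hk0, pvLetter_even _ k hk0 hke]
      have hodd : (k + 1) % 2 = 1 := by omega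
      rw [hprev]
      by_cases hv : pvLetter (c :: t) k ∈ pvVowels
      · rw [if_pos hv, if_neg (fun h => h.2 hv), up_getD, if_neg (Nat.succ_ne_zero k)]
      · rw [if_neg hv, if_pos ⟨hodd, hv⟩, up_getD, if_neg (Nat.succ_ne_zero k), lower_upper]

-- the partially fixed word after m steps of B's second pass
def pvStage (c : Char) (t : List Char) (m : Nat) : List Char :=
  (List.range (c :: t).length).map
    (fun j => if j < 2 * m then pvLetter (c :: t) j
              else (c :: PySem.Chars.upper t).getD j ' ')

lemma pvStage_getD (c : Char) (t : List Char) (m j : Nat) (hj : j < (c :: t).length) :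
    (pvStage c t m).getD j ' ' =
      if j < 2 * m then pvLetter (c :: t) j
      else (c :: PySem.Chars.upper t).getD j ' ' := by
  unfold pvStage
  exact PySem.List.getD_map_range _ _ j ' ' hj

-- one step of B's loop advances the stage by one pair of positions
lemma pvStage_step (c : Char) (t : List Char) (m : Nat) (hm : 2 * m + 1 < (c :: t).length) :
    (if PySem.List.pyGetD (c :: PySem.Chars.upper t) ((1 + 2 * (m : Int)) - 1) ' ' ∈ pvVowels
      then pvStage c t m
      else PySem.List.pySetD (pvStage c t m) (1 + 2 * (m : Int))
        (PySem.Chars.lowerChar (PySem.List.pyGetD (pvStage c t m) (1 + 2 * (m : Int)) ' '))) =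
    pvStage c t (m + 1) := by
  have hc1 : ((1 : Int) + 2 * (m : Int)) - 1 = ((2 * m : Nat) : Int) := by push_cast; ring
  have hc2 : ((1 : Int) + 2 * (m : Int)) = ((2 * m + 1 : Nat) : Int) := by push_cast; ring
  rw [hc1, hc2, PySem.List.pyGetD_natCast, PySem.List.pyGetD_natCast, PySem.List.pySetD_natCast]
  have hstg : (pvStage c t m).getD (2 * m + 1) ' ' =
      (c :: PySem.Chars.upper t).getD (2 * m + 1) ' ' := by
    rw [pvStage_getD c t m _ hm, if_neg (by omega)]
  have hext : ∀ (xs ys : List Char), xs.length = ys.length →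
      (∀ j, j < ys.length → xs.getD j ' ' = ys.getD j ' ') → xs = ys := by
    intro xs ys hlen hall
    apply List.ext_getElem hlen
    intro j h1 h2
    have := hall j h2
    rwa [List.getD_eq_getElem xs ' ' h1, List.getD_eq_getElem ys ' ' h2] at this
  have hlenS : (pvStage c t m).length = (c :: t).length := by simp [pvStage]
  have hlenS' : (pvStage c t (m + 1)).length = (c :: t).length := by simp [pvStage]
  by_cases hv : (c :: PySem.Chars.upper t).getD (2 * m) ' ' ∈ pvVowels
  · rw [if_pos hv]
    apply hext _ _ (by rw [hlenS, hlenS'])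
    intro j hj
    rw [hlenS'] at hj
    rw [pvStage_getD c t m j hj, pvStage_getD c t (m + 1) j hj]
    by_cases h1 : j < 2 * m
    · rw [if_pos h1, if_pos (by omega)]
    · rw [if_neg h1]
      by_cases h2 : j < 2 * (m + 1)
      · rw [if_pos h2, pvLetter_from_up]
        by_cases hjo : j % 2 = 1
        · have hj1 : j = 2 * m + 1 := by omega
          subst hj1
          rw [if_neg (fun h => h.2 (by simpa using hv))]
        · rw [if_neg (fun h => hjo h.1)]
      · rw [if_neg h2]
  · rw [if_neg hv, hstg]
    apply hext _ _ (by rw [List.length_set, hlenS, hlenS'])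
    intro j hj
    rw [hlenS'] at hj
    rw [pvStage_getD c t (m + 1) j hj]
    by_cases hj1 : j = 2 * m + 1
    · subst hj1
      rw [List.getD_eq_getElem _ ' ' (by rw [List.length_set, hlenS]; exact hm),
        List.getElem_set_self, if_pos (by omega), pvLetter_from_up,
        if_pos ⟨by omega, by simpa using hv⟩]
    · have hset : ((pvStage c t m).set (2 * m + 1)
          (PySem.Chars.lowerChar ((c :: PySem.Chars.upper t).getD (2 * m + 1) ' '))).getD j ' ' =
          (pvStage c t m).getD j ' ' := by
        simp [List.getD, List.getElem?_set_ne (Ne.symm hj1)]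
      rw [hset, pvStage_getD c t m j hj]
      by_cases h1 : j < 2 * m
      · rw [if_pos h1, if_pos (by omega)]
      · rw [if_neg h1]
        by_cases h2 : j < 2 * (m + 1)
        · have hje : j = 2 * m := by omega
          subst hje
          rw [if_pos h2, pvLetter_from_up, if_neg (fun h => by omega)]
        · rw [if_neg h2]

-- B's second pass, run for m steps, yields the m-th stage
lemma foldB_stage (c : Char) (t : List Char) :
    ∀ m, 2 * m ≤ (c :: t).length →
      ((List.range m).map (fun k : Nat => (1 : Int) + 2 * (k : Int))).foldl
        (fun acc i =>
          if PySem.List.pyGetD (c :: PySem.Chars.upper t) (i - 1) ' ' ∈ pvVowels then acc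
          else PySem.List.pySetD acc i
            (PySem.Chars.lowerChar (PySem.List.pyGetD acc i ' ')))
        (c :: PySem.Chars.upper t) = pvStage c t m := by
  intro m
  induction m with
  | zero =>
    intro _
    show (c :: PySem.Chars.upper t) = pvStage c t 0
    unfold pvStage
    simp only [Nat.mul_zero, Nat.not_lt_zero, if_false]
    rw [← up_length c t]
    exact (self_eq_map_range _).symm
  | succ m ih =>
    intro hm
    rw [List.range_succ, List.map_append, List.foldl_append, ih (by omega)]
    simpa using pvStage_step c t m (by omega)

-- the full second pass yields the pvLetter word
lemma foldB_eq (c : Char) (t : List Char) :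
    (PySem.List.pyRange 1 (PySem.List.len (c :: PySem.Chars.upper t)) 2).foldl
      (fun acc i =>
        if PySem.List.pyGetD (c :: PySem.Chars.upper t) (i - 1) ' ' ∈ pvVowels then acc
        else PySem.List.pySetD acc i
          (PySem.Chars.lowerChar (PySem.List.pyGetD acc i ' ')))
      (c :: PySem.Chars.upper t) =
    (List.range (c :: t).length).map (pvLetter (c :: t)) := by
  have hn : PySem.List.len (c :: PySem.Chars.upper t) = ((c :: t).length : Int) := by
    rw [PySem.List.len_eq, up_length]
  have hM : (if (1 : Int) < ((c :: t).length : Int)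
        then ((((c :: t).length : Int) - 1 + 2 - 1) / 2).toNat else 0) =
      (c :: t).length / 2 := by
    have h2 : (((c :: t).length : Int) - 1 + 2 - 1) / 2 = (((c :: t).length / 2 : Nat) : Int) := by
      have h3 : (((c :: t).length : Int) - 1 + 2 - 1) = (((c :: t).length : Nat) : Int) := by ring
      rw [h3]; exact_mod_cast rfl
    rw [h2]; split <;> omega
  have hrange : PySem.List.pyRange 1 ((c :: t).length : Int) 2 =
      (List.range ((c :: t).length / 2)).map (fun k : Nat => (1 : Int) + 2 * (k : Int)) := by
    rw [PySem.List.pyRange_of_pos 1 _ (by omega), hM]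
  rw [hn, hrange, foldB_stage c t _ (by omega)]
  unfold pvStage
  apply List.map_congr_left
  intro j hj
  rw [List.mem_range] at hj
  by_cases h : j < 2 * ((c :: t).length / 2)
  · rw [if_pos h]
  · have hje : j % 2 = 0 := by omega
    have hj0 : j ≠ 0 ∨ j = 0 := by omega
    rw [if_neg h, pvLetter_from_up, if_neg (by omega)]

-- ===== VERDICT (by name: the statement is the Claim_ definition above) =====
theorem dronken_worden_spec : Claim_equal_dronken_worden := by
  intro woord _ hpre
  unfold Spec_dronken_worden dronken_worden dronken_worden_alt
  unfold Pre_dronken_worden at hpre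
  cases hcs : woord.toList with
  | nil => exact absurd hcs hpre
  | cons c t =>
    show String.ofList (dronkenA_loop (c :: t) 1 [c]) = String.ofList _
    rw [foldB_eq c t]
    have h1 : [c] = (List.range 1).map (pvLetter (c :: t)) := by
      simp [pvLetter_zero]
    rw [h1, dronkenA_loop_eq (c :: t) ((c :: t).length - 1) 1 rfl (by omega) (by simp)]
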